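-- pv_equiv track=rewrite | github.com/Guilhermeslucas/interview_questions | supiciousActivities.py | find_suspicious_activities
-- ===== SOURCE A (Python) =====
-- def find_suspicious_activities(new_activities, suspicious_activities):
--     confirmed_suspicious = [False]*len(new_activities)
--     new_suspicious_activities = []
--
--     suspicious_activities_index = 0
--     while suspicious_activities_index < len(suspicious_activities):
--         new_activities_index = 0
--         while new_activities_index < len(new_activities):
--             if not(confirmed_suspicious[new_activities_index]) and is_suspicious_activitie(suspicious_activities[suspicious_activities_index], new_activities[new_activities_index]):
--                 new_suspicious_activities.append(new_activities[new_activities_index])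
--                 confirmed_suspicious[new_activities_index] = True
--                 suspicious_activities.append(new_activities[new_activities_index])
--
--             new_activities_index += 1
--
--         suspicious_activities_index += 1
--
--     return new_suspicious_activities
--
-- def is_suspicious_activitie(current_suspicious_activitie, new_suspicious_activitie):
--     k = 2
--     total = 0
--     for i in range(3):
--         if current_suspicious_activitie[i] == new_suspicious_activitie[i]:
--             total = total + 1
--
--         if total == k:
--             return True
--
--     return False
-- ===== SOURCE B (Python) =====
-- def _match2(q, a):
--     return (q[0] == a[0]) + (q[1] == a[1]) + (q[2] == a[2]) >= 2
--
-- def find_suspicious_activities(new_activities, suspicious_activities):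
--     pending = list(suspicious_activities)
--     remaining = list(new_activities)
--     result = []
--     while pending:
--         q = pending[0]
--         pending = pending[1:]
--         matched = [a for a in remaining if _match2(q, a)]
--         remaining = [a for a in remaining if not _match2(q, a)]
--         pending += matched
--         result += matched
--     return result
-- ===== Notes on version B (the rewrite author's own statement) =====
-- stated objective: faster
-- what changed: A keeps a confirmed-flags array and rescans the whole new_activities list (by index) for every element of the growing suspicious list it mutates in place; B runs an explicit worklist and filters a shrinking 'remaining' pool with a counting 2-of-3 match predicate, so matched activities drop out of all later scans (measured ~3x at the largest size; return value only: B does not mutate suspicious_activities).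
-- outside the precondition, e.g. on find_suspicious_activities([[1, 2]], [[1, 2]]): A returns [[1, 2]], B raises IndexError
import Mathlib
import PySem

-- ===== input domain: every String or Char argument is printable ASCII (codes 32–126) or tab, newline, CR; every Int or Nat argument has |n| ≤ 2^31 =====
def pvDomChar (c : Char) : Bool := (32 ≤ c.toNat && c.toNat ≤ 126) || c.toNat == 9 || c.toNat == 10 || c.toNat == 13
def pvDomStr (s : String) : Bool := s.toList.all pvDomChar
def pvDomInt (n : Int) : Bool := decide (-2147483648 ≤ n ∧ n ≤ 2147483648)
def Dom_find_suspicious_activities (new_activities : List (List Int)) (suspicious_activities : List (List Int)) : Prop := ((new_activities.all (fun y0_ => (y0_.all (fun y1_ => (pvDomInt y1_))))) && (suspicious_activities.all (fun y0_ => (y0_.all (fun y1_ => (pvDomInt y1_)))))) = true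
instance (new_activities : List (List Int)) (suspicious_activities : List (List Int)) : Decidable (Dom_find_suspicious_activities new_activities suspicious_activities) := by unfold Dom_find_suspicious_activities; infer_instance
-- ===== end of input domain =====

-- B replaces A's confirmed-flags array and repeated full rescans of new_activities by a
-- worklist that filters a shrinking 'remaining' list (objective: alternative structure).
-- NOTE: Python A mutates its suspicious_activities argument (appends matches); B does not —
-- the equivalence proved here is about the RETURN value only.

-- ===== PORT A =====
-- is_suspicious_activitie: for i in range(3): count equal coords, early-return at 2.
def pvIsSuspLoop (cur act : List Int) (i total : Nat) : Bool :=
  if h : i < 3 then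
    let total' := if cur.getD i 0 == act.getD i 0 then total + 1 else total
    if total' == 2 then true
    else pvIsSuspLoop cur act (i + 1) total'
  else false
termination_by 3 - i

def is_suspicious_activitie (cur act : List Int) : Bool := pvIsSuspLoop cur act 0 0

-- inner while loop over new_activities_index; state: (confirmed, suspicious_activities, new_suspicious_activities)
def pvInnerA (q : List Int) (new : List (List Int)) (idx : Nat) (confirmed : List Bool)
    (queue acc : List (List Int)) : List Bool × List (List Int) × List (List Int) :=
  if idx < new.length then
    if !(confirmed.getD idx false) && is_suspicious_activitie q (new.getD idx []) then
      pvInnerA q new (idx + 1) (confirmed.set idx true)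
        (queue ++ [new.getD idx []]) (acc ++ [new.getD idx []])
    else pvInnerA q new (idx + 1) confirmed queue acc
  else (confirmed, queue, acc)
termination_by new.length - idx

-- outer while loop over suspicious_activities_index (the queue grows; fuel only guards totality)
def pvOuterA (new : List (List Int)) (fuel : Nat) (queue : List (List Int)) (sIdx : Nat)
    (confirmed : List Bool) (acc : List (List Int)) : List (List Int) :=
  match fuel with
  | 0 => acc
  | fuel + 1 =>
    if sIdx < queue.length then
      let r := pvInnerA (queue.getD sIdx []) new 0 confirmed queue acc
      pvOuterA new fuel r.2.1 (sIdx + 1) r.1 r.2.2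
    else acc

def find_suspicious_activities (new_activities : List (List Int)) (suspicious_activities : List (List Int)) : List (List Int) :=
  pvOuterA new_activities (suspicious_activities.length + new_activities.length)
    suspicious_activities 0 (List.replicate new_activities.length false) []

-- ===== PORT B =====

-- ===== PORT B =====
def pvMatch2 (q a : List Int) : Bool :=
  decide (2 ≤ (if q.getD 0 0 == a.getD 0 0 then (1:Nat) else 0)
            + (if q.getD 1 0 == a.getD 1 0 then (1:Nat) else 0)
            + (if q.getD 2 0 == a.getD 2 0 then (1:Nat) else 0))

-- the two list comprehensions of Source B
def pvMatched (q : List Int) (remaining : List (List Int)) : List (List Int) :=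
  remaining.filter (fun a => pvMatch2 q a)

def pvUnmatched (q : List Int) (remaining : List (List Int)) : List (List Int) :=
  remaining.filter (fun a => !pvMatch2 q a)

-- needed by pvBfsB's termination proof
theorem pvMatched_add_unmatched (q : List Int) (remaining : List (List Int)) :
    (pvMatched q remaining).length + (pvUnmatched q remaining).length = remaining.length := by
  induction remaining with
  | nil => simp [pvMatched, pvUnmatched]
  | cons a l ih =>
    simp only [pvMatched, pvUnmatched, List.filter_cons] at *
    cases pvMatch2 q a <;> simp <;> omega

-- the while loop of Source B: worklist `pending`, shrinking pool `remaining`, accumulator `result`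
def pvBfsB (pending remaining result : List (List Int)) : List (List Int) :=
  match pending with
  | [] => result
  | q :: ps =>
      pvBfsB (ps ++ pvMatched q remaining) (pvUnmatched q remaining) (result ++ pvMatched q remaining)
termination_by pending.length + 2 * remaining.length
decreasing_by
  simp only [List.length_append, List.length_cons]
  have h := pvMatched_add_unmatched q remaining
  omega

def find_suspicious_activities_alt (new_activities : List (List Int)) (suspicious_activities : List (List Int)) : List (List Int) :=
  pvBfsB suspicious_activities new_activities []

-- ===== PRECONDITION & SPEC =====
-- Pre_ excludes inputs where some activity record has fewer than 3 coordinates while both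
-- argument lists are non-empty: there Python A can raise IndexError inside is_suspicious_activitie.
def Pre_find_suspicious_activities (new_activities : List (List Int)) (suspicious_activities : List (List Int)) : Prop :=
  new_activities = [] ∨ suspicious_activities = [] ∨
    ((∀ l ∈ new_activities, 3 ≤ l.length) ∧ (∀ l ∈ suspicious_activities, 3 ≤ l.length))
instance (new_activities : List (List Int)) (suspicious_activities : List (List Int)) : Decidable (Pre_find_suspicious_activities new_activities suspicious_activities) := by unfold Pre_find_suspicious_activities; infer_instance

def pvWitness_find_suspicious_activities : List (List Int) × List (List Int) :=
  ([[1, 2, 3], [1, 5, 3], [9, 9, 9]], [[1, 2, 4]])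

def Spec_find_suspicious_activities (new_activities : List (List Int)) (suspicious_activities : List (List Int)) (out : List (List Int)) : Prop := out = find_suspicious_activities_alt new_activities suspicious_activities
instance (new_activities : List (List Int)) (suspicious_activities : List (List Int)) (out : List (List Int)) : Decidable (Spec_find_suspicious_activities new_activities suspicious_activities out) := by unfold Spec_find_suspicious_activities; infer_instance

-- ===== CLAIM (what is proved, stated in full; the proofs are below) =====
def Claim_equal_find_suspicious_activities : Prop := ∀ (new_activities : List (List Int)) (suspicious_activities : List (List Int)), Dom_find_suspicious_activities new_activities suspicious_activities → Pre_find_suspicious_activities new_activities suspicious_activities → Spec_find_suspicious_activities new_activities suspicious_activities (find_suspicious_activities new_activities suspicious_activities)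

-- ===== LEMMAS AND PROOFS =====

-- the activities of `new` whose confirmed flag is still false, in order
def pvRem (new : List (List Int)) (C : List Bool) : List (List Int) :=
  ((new.zip C).filter (fun p => !p.2)).map Prod.fst

theorem pvIsSusp_eq_match2 (q a : List Int) : is_suspicious_activitie q a = pvMatch2 q a := by
  by_cases h0 : q[0]?.getD 0 = a[0]?.getD 0 <;>
  by_cases h1 : q[1]?.getD 0 = a[1]?.getD 0 <;>
  by_cases h2 : q[2]?.getD 0 = a[2]?.getD 0 <;>
  simp [is_suspicious_activitie, pvIsSuspLoop, pvMatch2, h0, h1, h2]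

theorem pv_take_set_succ (l : List Bool) (idx : Nat) (h : idx < l.length) (b : Bool) :
    (l.set idx b).take (idx + 1) = l.take idx ++ [b] := by
  rw [List.take_set, List.take_add_one, List.getElem?_eq_getElem h]
  have hlen : (l.take idx).length = idx := by simp; omega
  rw [List.set_append]
  simp [hlen]

theorem pvRem_cons_true (a : List Int) (n : List (List Int)) (c : List Bool) :
    pvRem (a :: n) (true :: c) = pvRem n c := by simp [pvRem]

theorem pvRem_cons_false (a : List Int) (n : List (List Int)) (c : List Bool) :
    pvRem (a :: n) (false :: c) = a :: pvRem n c := by simp [pvRem]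

theorem pvMatched_cons (q a : List Int) (r : List (List Int)) :
    pvMatched q (a :: r) = (if pvMatch2 q a then [a] else []) ++ pvMatched q r := by
  simp [pvMatched, List.filter_cons]; split <;> simp

theorem pvInnerA_spec (q : List Int) (new : List (List Int)) :
    ∀ idx (C : List Bool) queue acc, C.length = new.length →
    pvInnerA q new idx C queue acc =
      (C.take idx ++ List.zipWith (fun a c => c || pvMatch2 q a) (new.drop idx) (C.drop idx),
       queue ++ pvMatched q (pvRem (new.drop idx) (C.drop idx)),
       acc ++ pvMatched q (pvRem (new.drop idx) (C.drop idx))) := by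
  suffices H : ∀ k idx (C : List Bool) queue acc, new.length - idx ≤ k → C.length = new.length →
      pvInnerA q new idx C queue acc =
      (C.take idx ++ List.zipWith (fun a c => c || pvMatch2 q a) (new.drop idx) (C.drop idx),
       queue ++ pvMatched q (pvRem (new.drop idx) (C.drop idx)),
       acc ++ pvMatched q (pvRem (new.drop idx) (C.drop idx))) by
    exact fun idx C queue acc hC => H new.length idx C queue acc (by omega) hC
  intro k
  induction k with
  | zero =>
    intro idx C queue acc hk hC
    have h : ¬ idx < new.length := by omega
    rw [pvInnerA]
    simp [h, List.drop_eq_nil_of_le (by omega : new.length ≤ idx),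
      List.take_of_length_le (by omega : C.length ≤ idx), pvRem, pvMatched]
  | succ k ih =>
    intro idx C queue acc hk hC
    by_cases h : idx < new.length
    · have hCi : idx < C.length := by omega
      have hdn : new.drop idx = new[idx] :: new.drop (idx + 1) := List.drop_eq_getElem_cons h
      have hdC : C.drop idx = C[idx] :: C.drop (idx + 1) := List.drop_eq_getElem_cons hCi
      have hgC : C.getD idx false = C[idx] := List.getD_eq_getElem C false hCi
      have hgN : new.getD idx [] = new[idx] := List.getD_eq_getElem new [] h
      have htk : C.take (idx + 1) = C.take idx ++ [C[idx]] := by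
        rw [List.take_add_one, List.getElem?_eq_getElem hCi]; rfl
      rw [pvInnerA]
      simp only [if_pos h, hgC, hgN, pvIsSusp_eq_match2]
      cases hc : C[idx] with
      | true =>
        simp only [Bool.not_true, Bool.false_and, Bool.false_eq_true, ite_false]
        rw [ih (idx + 1) C queue acc (by omega) hC, hdn, hdC, hc, htk, hc]
        simp only [List.zipWith_cons_cons, Bool.true_or, pvRem_cons_true, List.append_assoc,
          List.cons_append, List.nil_append]
      | false =>
        cases hm : pvMatch2 q new[idx] with
        | true =>
          simp only [Bool.not_false, Bool.true_and, ite_true]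
          rw [ih (idx + 1) (C.set idx true) (queue ++ [new[idx]]) (acc ++ [new[idx]])
              (by omega) (by simp [hC])]
          have hds : (C.set idx true).drop (idx + 1) = C.drop (idx + 1) := by
            rw [List.drop_set]; simp
          rw [pv_take_set_succ C idx hCi true, hds, hdn, hdC, hc]
          simp only [List.zipWith_cons_cons, Bool.false_or, hm, pvRem_cons_false, pvMatched_cons,
            ite_true, List.append_assoc, List.cons_append, List.nil_append]
        | false =>
          simp only [Bool.not_false, Bool.true_and]
          rw [ih (idx + 1) C queue acc (by omega) hC, hdn, hdC, hc, htk, hc]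
          simp only [List.zipWith_cons_cons, Bool.false_or, hm, pvRem_cons_false, pvMatched_cons,
            Bool.false_eq_true, ite_false, List.append_assoc, List.cons_append, List.nil_append]
    · have h' : ¬ idx < new.length := h
      rw [pvInnerA]
      simp [h', List.drop_eq_nil_of_le (by omega : new.length ≤ idx),
        List.take_of_length_le (by omega : C.length ≤ idx), pvRem, pvMatched]

theorem pvRem_flags (q : List Int) :
    ∀ (new : List (List Int)) (C : List Bool), C.length = new.length →
    pvRem new (List.zipWith (fun a c => c || pvMatch2 q a) new C)
      = pvUnmatched q (pvRem new C) := by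
  intro new
  induction new with
  | nil => intro C h; simp [pvRem, pvUnmatched]
  | cons a new ih =>
    intro C h
    cases C with
    | nil => simp at h
    | cons c C =>
      simp only [List.length_cons] at h
      cases c <;> cases hm : pvMatch2 q a <;>
        simp [pvRem, pvUnmatched, List.zip_cons_cons, hm] <;>
        simpa [pvRem, pvUnmatched] using ih C (by omega)

theorem pvRem_replicate (new : List (List Int)) :
    pvRem new (List.replicate new.length false) = new := by
  induction new with
  | nil => rfl
  | cons a l ih => simpa [pvRem, List.replicate_succ, List.zip_cons_cons] using ih

theorem pvOuterA_spec (new : List (List Int)) :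
    ∀ fuel (queue : List (List Int)) sIdx (C : List Bool) acc,
      C.length = new.length →
      queue.length - sIdx + (pvRem new C).length ≤ fuel →
      pvOuterA new fuel queue sIdx C acc = pvBfsB (queue.drop sIdx) (pvRem new C) acc := by
  intro fuel
  induction fuel with
  | zero =>
    intro queue sIdx C acc hC hf
    have h1 : queue.length ≤ sIdx := by omega
    rw [pvOuterA, List.drop_eq_nil_of_le h1, pvBfsB]
  | succ fuel ih =>
    intro queue sIdx C acc hC hf
    rw [pvOuterA]
    by_cases h : sIdx < queue.length
    · simp only [if_pos h]
      have hq : queue.getD sIdx [] = queue[sIdx] := List.getD_eq_getElem queue [] h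
      rw [hq, pvInnerA_spec queue[sIdx] new 0 C queue acc hC]
      simp only [List.take_zero, List.nil_append, List.drop_zero]
      have hlen : (List.zipWith (fun a c => c || pvMatch2 queue[sIdx] a) new C).length
          = new.length := by simp [List.length_zipWith, hC]
      have hflags := pvRem_flags queue[sIdx] new C hC
      have hm := pvMatched_add_unmatched queue[sIdx] (pvRem new C)
      rw [ih (queue ++ pvMatched queue[sIdx] (pvRem new C)) (sIdx + 1)
            (List.zipWith (fun a c => c || pvMatch2 queue[sIdx] a) new C)
            (acc ++ pvMatched queue[sIdx] (pvRem new C))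
            hlen
            (by rw [hflags]; simp only [List.length_append]; omega)]
      rw [hflags]
      rw [List.drop_append_of_le_length (by omega), List.drop_eq_getElem_cons h]
      rw [pvBfsB]
    · simp only [if_neg h]
      rw [List.drop_eq_nil_of_le (by omega), pvBfsB]

-- ===== VERDICT (by name: the statement is the Claim_ definition above) =====
theorem find_suspicious_activities_spec : Claim_equal_find_suspicious_activities := by
  intro new sus _ _
  unfold Spec_find_suspicious_activities find_suspicious_activities find_suspicious_activities_alt
  rw [pvOuterA_spec new _ sus 0 _ [] (by simp) (by simp [pvRem_replicate])]
  simp [pvRem_replicate]
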